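-- pv_equiv track=rewrite | github.com/SunBK201/ScubaTrace | scubatrace/differ.py | context_map
-- ===== SOURCE A (Python) =====
-- def context_map(content: str, diff_lines: list[int]) -> dict[int, int]:
--     """
--     Create a mapping from original line numbers to modified line numbers based on the diff lines.
--
--     Args:
--         content (str): The original content as a string.
--         diff_lines (list[int]): A list of line numbers that were added or deleted.
--
--     Returns:
--         dict[int, int]: A dictionary mapping original line numbers to modified line numbers.
--     """
--     lines = content.splitlines(keepends=True)
--     mapping = {}
--     offset = 0
--     for i in range(len(lines)):
--         original_line_num = i + 1
--         if original_line_num in diff_lines: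
--             offset += 1
--         mapping[original_line_num] = original_line_num + offset
--     return mapping
-- ===== SOURCE B (Python) =====
-- def context_map(content: str, diff_lines: list[int]) -> dict[int, int]:
--     """Same mapping, computed by a sort-and-merge instead of a per-line
--     membership scan: dedupe and sort the relevant diff line numbers once,
--     then sweep a single pointer through them while emitting the lines."""
--     n = len(content.splitlines())
--     diffs = sorted({d for d in diff_lines if 1 <= d})
--     mapping = {}
--     j = 0
--     for k in range(1, n + 1):
--         while j < len(diffs) and diffs[j] <= k:
--             j += 1
--         mapping[k] = k + j
--     return mapping
-- ===== Notes on version B (the rewrite author's own statement) =====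
-- stated objective: alternative
-- what changed: Replaces the per-line membership scan of diff_lines (running-offset accumulator) with a filter+dedupe+sort of the relevant diff line numbers followed by a single merge-style pointer sweep over the lines.
import Mathlib
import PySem

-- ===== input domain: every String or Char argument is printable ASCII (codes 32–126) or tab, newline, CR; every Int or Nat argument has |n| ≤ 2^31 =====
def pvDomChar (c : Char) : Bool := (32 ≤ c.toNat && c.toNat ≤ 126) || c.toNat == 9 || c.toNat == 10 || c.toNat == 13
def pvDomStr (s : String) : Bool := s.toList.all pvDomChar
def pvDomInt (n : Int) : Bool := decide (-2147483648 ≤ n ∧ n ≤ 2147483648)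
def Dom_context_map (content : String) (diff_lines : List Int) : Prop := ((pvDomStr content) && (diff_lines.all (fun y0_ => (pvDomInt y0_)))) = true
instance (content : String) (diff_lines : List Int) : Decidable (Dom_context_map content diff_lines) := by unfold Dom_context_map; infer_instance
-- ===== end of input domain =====

-- B replaces A's per-line membership scan of diff_lines by a filter+dedupe+sort of the
-- diff line numbers and a single merge-style pointer sweep over the lines (alternative algorithm).

-- ===== PORT A =====
-- splitlines(keepends=True): keepends only changes the text of each line, never their
-- number, and A uses only len(lines); PySem.Str.splitlines has the exact same length.
def context_map (content : String) (diff_lines : List Int) : List (Int × Int) :=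
  let lines := PySem.Str.splitlines content
  let r := (PySem.List.pyRange 0 (lines.length : Int) 1).foldl
    (fun (st : PySem.Dict Int Int × Int) i =>
      let n := i + 1
      let offset := if n ∈ diff_lines then st.2 + 1 else st.2
      (st.1.insert n (n + offset), offset))
    (PySem.Dict.empty, 0)
  r.1.items

-- ===== PORT B =====
-- the 'while j < len(diffs) and diffs[j] <= k: j += 1' loop of Source B
def ctxAdvance (diffs : List Int) (k : Int) (j : Nat) : Nat :=
  if h : j < diffs.length then
    if diffs[j] ≤ k then ctxAdvance diffs k (j + 1) else j
  else j
termination_by diffs.length - j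

def context_map_alt (content : String) (diff_lines : List Int) : List (Int × Int) :=
  let n := (PySem.Str.splitlines content).length
  let diffs := PySem.List.sorted (PySem.Set.ofList (diff_lines.filter (fun d => 1 ≤ d))) (fun x => x) false
  let r := (PySem.List.pyRange 1 ((n : Int) + 1) 1).foldl
    (fun (st : PySem.Dict Int Int × Nat) k =>
      let j := ctxAdvance diffs k st.2
      (st.1.insert k (k + (j : Int)), j))
    (PySem.Dict.empty, 0)
  r.1.items

-- ===== PRECONDITION & SPEC =====
def Spec_context_map (content : String) (diff_lines : List Int) (out : List (Int × Int)) : Prop := out = context_map_alt content diff_lines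
instance (content : String) (diff_lines : List Int) (out : List (Int × Int)) : Decidable (Spec_context_map content diff_lines out) := by unfold Spec_context_map; infer_instance

-- ===== CLAIM (what is proved, stated in full; the proofs are below) =====
def Claim_equal_context_map : Prop := ∀ (content : String) (diff_lines : List Int), Dom_context_map content diff_lines → Spec_context_map content diff_lines (context_map content diff_lines)

-- ===== LEMMAS AND PROOFS =====

-- number of lines among 1..m that A's membership test hits
def ctxF (dl : List Int) (m : Nat) : Nat :=
  (List.range m).countP (fun (i : Nat) => decide (((i : Int) + 1) ∈ dl))

theorem ctxF_succ (dl : List Int) (m : Nat) :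
    ctxF dl (m + 1) = ctxF dl m + (if ((m : Int) + 1) ∈ dl then 1 else 0) := by
  simp [ctxF, List.range_succ, List.countP_append]

-- A's loop over the first m lines: the dict's items and the running offset, in closed form
theorem contextA_inv (dl : List Int) (m : Nat) :
    (PySem.List.pyRange 0 (m : Int) 1).foldl
      (fun (st : PySem.Dict Int Int × Int) i =>
        let n := i + 1
        let offset := if n ∈ dl then st.2 + 1 else st.2
        (st.1.insert n (n + offset), offset))
      (PySem.Dict.empty, 0)
    = (PySem.Dict.mk ((List.range m).map
        (fun (i : Nat) => ((i : Int) + 1, (i : Int) + 1 + (ctxF dl (i + 1) : Int)))),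
       (ctxF dl m : Int)) := by
  induction m with
  | zero => simp [PySem.List.pyRange_one_eq_nil, ctxF, PySem.Dict.empty]
  | succ m ih =>
    have h : ((m + 1 : Nat) : Int) = (m : Int) + 1 := by push_cast; ring
    rw [h, PySem.List.pyRange_one_succ_right (by positivity), List.foldl_append, ih]
    simp only [List.foldl_cons, List.foldl_nil]
    have hnc : (PySem.Dict.mk ((List.range m).map
        (fun (i : Nat) => ((i : Int) + 1, (i : Int) + 1 + (ctxF dl (i + 1) : Int))))).contains ((m : Int) + 1) = false := by
      simp [PySem.Dict.contains_mk]
      intro i hi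
      omega
    apply Prod.ext
    · apply PySem.Dict.ext
      rw [PySem.Dict.items_insert_of_not_contains _ _ hnc]
      simp [List.range_succ, ctxF_succ]
      split_ifs <;> ring
    · simp [ctxF_succ]
      split_ifs <;> ring

-- in a sorted list, the positions below countP (· ≤ k) are exactly the elements ≤ k
theorem sorted_prefix_le (S : List Int) (hS : S.Pairwise (fun a b => a ≤ b)) (k : Int)
    (i : Nat) (hi : i < S.length) :
    S[i] ≤ k ↔ i < S.countP (fun d => decide (d ≤ k)) := by
  induction S generalizing i with
  | nil => simp at hi
  | cons x t ih =>
    rw [List.pairwise_cons] at hS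
    cases i with
    | zero =>
      simp only [List.getElem_cons_zero, List.countP_cons]
      by_cases hx : x ≤ k
      · simp [hx]
      · simp only [hx, decide_false]
        have : t.countP (fun d => decide (d ≤ k)) = 0 := by
          rw [List.countP_eq_zero]
          intro d hd
          simp only [decide_eq_true_eq]
          intro hdk
          exact hx (le_trans (hS.1 d hd) hdk)
        simp [this]
    | succ i =>
      simp only [List.getElem_cons_succ, List.countP_cons]
      by_cases hx : x ≤ k
      · rw [ih hS.2 i (by simpa using hi)]
        simp [hx]
      · have : t.countP (fun d => decide (d ≤ k)) = 0 := by
          rw [List.countP_eq_zero]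
          intro d hd
          simp only [decide_eq_true_eq]
          intro hdk
          exact hx (le_trans (hS.1 d hd) hdk)
        have hit : i < t.length := by simpa using hi
        have hg : ¬ t[i] ≤ k := by
          intro hle
          have := (ih hS.2 i hit).mp hle
          omega
        simp [hx, hg]
        omega

-- Source B's while loop lands exactly on countP (· ≤ k) of the sorted table
theorem ctxAdvance_spec (S : List Int) (hS : S.Pairwise (fun a b => a ≤ b)) (k : Int)
    (j : Nat) (hj : j ≤ S.countP (fun d => decide (d ≤ k))) :
    ctxAdvance S k j = S.countP (fun d => decide (d ≤ k)) := by
  have hc : S.countP (fun d => decide (d ≤ k)) ≤ S.length := List.countP_le_length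
  rw [ctxAdvance]
  by_cases h : j < S.length
  · simp only [h, dif_pos]
    by_cases hle : S[j] ≤ k
    · rw [if_pos hle]
      have := (sorted_prefix_le S hS k j h).mp hle
      exact ctxAdvance_spec S hS k (j + 1) (by omega)
    · rw [if_neg hle]
      have := (sorted_prefix_le S hS k j h).not.mp hle
      omega
  · rw [dif_neg h]
    omega
termination_by S.length - j

-- B's loop over lines 1..m: the dict's items and the pointer, in closed form
theorem contextB_inv (S : List Int) (hS : S.Pairwise (fun a b => a ≤ b))
    (hpos : ∀ d ∈ S, 1 ≤ d) (m : Nat) :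
    (PySem.List.pyRange 1 ((m : Int) + 1) 1).foldl
      (fun (st : PySem.Dict Int Int × Nat) k =>
        let j := ctxAdvance S k st.2
        (st.1.insert k (k + (j : Int)), j))
      (PySem.Dict.empty, 0)
    = (PySem.Dict.mk ((List.range m).map
        (fun (i : Nat) => ((i : Int) + 1, (i : Int) + 1 + (S.countP (fun d => decide (d ≤ (i : Int) + 1)) : Int)))),
       S.countP (fun d => decide (d ≤ (m : Int)))) := by
  induction m with
  | zero =>
    have h0 : S.countP (fun d => decide (d ≤ (0 : Int))) = 0 := by
      rw [List.countP_eq_zero]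
      intro d hd
      simp only [decide_eq_true_eq]
      have := hpos d hd
      omega
    simp [PySem.List.pyRange_one_eq_nil, PySem.Dict.empty, h0]
  | succ m ih =>
    have h : ((m + 1 : Nat) : Int) + 1 = ((m : Int) + 1) + 1 := by push_cast; ring
    rw [h, PySem.List.pyRange_one_succ_right (by omega), List.foldl_append, ih]
    simp only [List.foldl_cons, List.foldl_nil]
    have hmono : S.countP (fun d => decide (d ≤ (m : Int)))
        ≤ S.countP (fun d => decide (d ≤ (m : Int) + 1)) := by
      apply List.countP_mono_left
      intro d _
      simp only [decide_eq_true_eq]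
      omega
    have hadv := ctxAdvance_spec S hS ((m : Int) + 1) _ hmono
    have hnc : (PySem.Dict.mk ((List.range m).map
        (fun (i : Nat) => ((i : Int) + 1, (i : Int) + 1 + (S.countP (fun d => decide (d ≤ (i : Int) + 1)) : Int))))).contains ((m : Int) + 1) = false := by
      simp [PySem.Dict.contains_mk]
      intro i hi
      omega
    apply Prod.ext
    · apply PySem.Dict.ext
      rw [hadv, PySem.Dict.items_insert_of_not_contains _ _ hnc]
      simp [List.range_succ]
    · simpa using hadv

-- A's running count and B's prefix count into the sorted distinct table agree
theorem counts_eq (dl : List Int) (k : Nat) :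
    (PySem.List.sorted (PySem.Set.ofList (dl.filter (fun d => 1 ≤ d))) (fun x => x) false).countP
        (fun d => decide (d ≤ (k : Int)))
      = ctxF dl k := by
  rw [(PySem.List.sorted_perm _ _ _).countP_eq]
  have hperm : ((PySem.Set.ofList (dl.filter (fun d => 1 ≤ d))).filter
        (fun d => decide (d ≤ (k : Int)))).Perm
      (((List.range k).filter (fun (i : Nat) => decide (((i : Int) + 1) ∈ dl))).map
        (fun (i : Nat) => (i : Int) + 1)) := by
    apply (List.perm_ext_iff_of_nodup ((PySem.Set.nodup_ofList _).filter _) ?_).mpr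
    · intro x
      simp only [List.mem_filter, List.mem_map, PySem.Set.mem_ofList, List.mem_range,
        decide_eq_true_eq]
      constructor
      · rintro ⟨⟨hmem, h1⟩, hk⟩
        have hx : (((x - 1).toNat : Int)) + 1 = x := by omega
        exact ⟨(x - 1).toNat, ⟨by omega, by rw [hx]; exact hmem⟩, hx⟩
      · rintro ⟨i, ⟨hik, hmem⟩, rfl⟩
        exact ⟨⟨hmem, by omega⟩, by omega⟩
    · apply List.Nodup.map
      · intro a b hab
        dsimp only at hab
        omega
      · exact List.nodup_range.filter _
  unfold ctxF
  rw [List.countP_eq_length_filter, hperm.length_eq, List.length_map,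
    ← List.countP_eq_length_filter]

-- ===== VERDICT (by name: the statement is the Claim_ definition above) =====
theorem context_map_spec : Claim_equal_context_map := by
  intro content dl _
  unfold Spec_context_map
  simp only [context_map, context_map_alt]
  have hlt := PySem.List.sorted_ofList_pairwise_lt (dl.filter (fun d => 1 ≤ d))
  have hS : (PySem.List.sorted (PySem.Set.ofList (dl.filter (fun d => 1 ≤ d))) (fun x => x) false).Pairwise
      (fun a b => a ≤ b) := hlt.imp (fun h => le_of_lt h)
  have hpos : ∀ d ∈ PySem.List.sorted (PySem.Set.ofList (dl.filter (fun d => 1 ≤ d))) (fun x => x) false, 1 ≤ d := by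
    intro d hd
    rw [PySem.List.mem_sorted, PySem.Set.mem_ofList, List.mem_filter] at hd
    simpa using hd.2
  rw [contextA_inv, contextB_inv _ hS hpos]
  simp only
  apply List.map_congr_left
  intro i _
  have := counts_eq dl (i + 1)
  push_cast at this ⊢
  rw [this]
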